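-- pv_equiv track=rewrite | github.com/hemanta-sfsu/CSC666-02-Lexicon-Sentiment-Analysis | project-code/new_heuristics.py | negated
-- ===== SOURCE A (Python) =====
-- NEGATE = \
--     ["aint", "arent", "cannot", "cant", "couldnt", "darent", "didnt", "doesnt",
--      "ain't", "aren't", "can't", "couldn't", "daren't", "didn't", "doesn't",
--      "dont", "hadnt", "hasnt", "havent", "isnt", "mightnt", "mustnt", "neither",
--      "don't", "hadn't", "hasn't", "haven't", "isn't", "mightn't", "mustn't",
--      "neednt", "needn't", "never", "none", "nope", "nor", "not", "nothing", "nowhere",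
--      "oughtnt", "shant", "shouldnt", "uhuh", "wasnt", "werent",
--      "oughtn't", "shan't", "shouldn't", "uh-uh", "wasn't", "weren't",
--      "without", "wont", "wouldnt", "won't", "wouldn't", "rarely", "seldom", "despite"]
--
-- def negated(input_words, include_nt=True):
--     """
--     Determine if input contains negation words
--     """
--     input_words = [str(w).lower() for w in input_words]
--     neg_words = []
--     neg_words.extend(NEGATE)
--     for word in neg_words:
--         if word in input_words:
--             return True
--     if include_nt:
--         for word in input_words:
--             if "n't" in word:
--                 return True
--     '''if "least" in input_words:
--         i = input_words.index("least")
--         if i > 0 and input_words[i - 1] != "at":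
--             return True'''
--     return False
-- ===== SOURCE B (Python) =====
-- _NEG_SET = set(
--     "aint arent cannot cant couldnt darent didnt doesnt "
--     "ain't aren't can't couldn't daren't didn't doesn't "
--     "dont hadnt hasnt havent isnt mightnt mustnt neither "
--     "don't hadn't hasn't haven't isn't mightn't mustn't "
--     "neednt needn't never none nope nor not nothing nowhere "
--     "oughtnt shant shouldnt uhuh wasnt werent "
--     "oughtn't shan't shouldn't uh-uh wasn't weren't "
--     "without wont wouldnt won't wouldn't rarely seldom despite".split())
--
-- def negated(input_words, include_nt=True):
--     """Determine if input contains negation words (single early-exit pass)."""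
--     for w in input_words:
--         s = str(w).lower()
--         if s in _NEG_SET or (include_nt and "n't" in s):
--             return True
--     return False
-- ===== Notes on version B (the rewrite author's own statement) =====
-- stated objective: faster
-- what changed: A early-exit pass over the input testing each lowered word against a hash set built once from a space-separated word string (set + n't substring checked together per word), replacing A's staged passes: an outer loop over the 60-word NEGATE list scanning the whole input, then a second loop for the n't substring.
import Mathlib
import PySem

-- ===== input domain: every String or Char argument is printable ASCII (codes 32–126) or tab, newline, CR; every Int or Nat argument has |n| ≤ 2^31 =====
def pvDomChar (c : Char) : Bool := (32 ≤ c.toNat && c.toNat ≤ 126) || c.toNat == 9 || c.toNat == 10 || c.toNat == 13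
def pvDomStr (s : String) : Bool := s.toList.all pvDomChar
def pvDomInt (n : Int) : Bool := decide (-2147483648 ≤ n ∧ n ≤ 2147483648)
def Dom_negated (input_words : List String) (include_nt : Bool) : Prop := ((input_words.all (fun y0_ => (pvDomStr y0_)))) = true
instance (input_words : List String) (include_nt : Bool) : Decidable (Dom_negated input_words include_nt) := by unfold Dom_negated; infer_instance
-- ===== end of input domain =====

-- B replaces A's staged passes (a loop over the 60-word NEGATE list each scanning the whole
-- input, then a second n't pass) by ONE early-exit pass over the input, testing each
-- word against a set built once from a single space-separated string.

-- ===== PORT A =====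
def NEGATE : List String :=
  ["aint", "arent", "cannot", "cant", "couldnt", "darent", "didnt", "doesnt",
   "ain't", "aren't", "can't", "couldn't", "daren't", "didn't", "doesn't",
   "dont", "hadnt", "hasnt", "havent", "isnt", "mightnt", "mustnt", "neither",
   "don't", "hadn't", "hasn't", "haven't", "isn't", "mightn't", "mustn't",
   "neednt", "needn't", "never", "none", "nope", "nor", "not", "nothing", "nowhere",
   "oughtnt", "shant", "shouldnt", "uhuh", "wasnt", "werent",
   "oughtn't", "shan't", "shouldn't", "uh-uh", "wasn't", "weren't",
   "without", "wont", "wouldnt", "won't", "wouldn't", "rarely", "seldom", "despite"]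

-- 'for word in neg_words: if word in input_words: return True'
def negLoopA (neg_words : List String) (input_words : List String) : Bool :=
  match neg_words with
  | [] => false
  | word :: rest => if input_words.contains word then true else negLoopA rest input_words

-- 'for word in input_words: if "n't" in word: return True'
def ntLoopA (input_words : List String) : Bool :=
  match input_words with
  | [] => false
  | word :: rest => if PySem.Str.isIn "n't" word then true else ntLoopA rest

def negated (input_words : List String) (include_nt : Bool) : Bool :=
  let input_words := input_words.map PySem.Str.lower
  let neg_words := ([] : List String) ++ NEGATE
  if negLoopA neg_words input_words then true
  else if include_nt then ntLoopA input_words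
  else false

-- ===== PORT B =====
-- set("aint arent … despite".split())  — Python concatenates the adjacent literals at compile time
def negSetB : PySem.Set String :=
  PySem.Set.ofList (PySem.Str.split₀
    ("aint arent cannot cant couldnt darent didnt doesnt ain't aren't can't couldn't daren't didn't doesn't dont hadnt hasnt havent isnt mightnt mustnt neither don't hadn't hasn't haven't isn't mightn't mustn't neednt needn't never none nope nor not nothing nowhere oughtnt shant shouldnt uhuh wasnt werent oughtn't shan't shouldn't uh-uh wasn't weren't without wont wouldnt won't wouldn't rarely seldom despite"))

def negated_alt (input_words : List String) (include_nt : Bool) : Bool :=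
  match input_words with
  | [] => false
  | w :: rest =>
    let s := PySem.Str.lower w
    if negSetB.contains s || (include_nt && PySem.Str.isIn "n't" s) then true
    else negated_alt rest include_nt

-- ===== PRECONDITION & SPEC =====
def Spec_negated (input_words : List String) (include_nt : Bool) (out : Bool) : Prop := out = negated_alt input_words include_nt
instance (input_words : List String) (include_nt : Bool) (out : Bool) : Decidable (Spec_negated input_words include_nt out) := by unfold Spec_negated; infer_instance

-- ===== CLAIM (what is proved, stated in full; the proofs are below) =====
def Claim_equal_negated : Prop := ∀ (input_words : List String) (include_nt : Bool), Dom_negated input_words include_nt → Spec_negated input_words include_nt (negated input_words include_nt)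

-- ===== LEMMAS AND PROOFS =====

theorem negLoopA_eq_true_iff (neg ws : List String) :
    negLoopA neg ws = true ↔ ∃ w ∈ neg, w ∈ ws := by
  induction neg with
  | nil => simp [negLoopA]
  | cons a rest ih =>
    simp only [negLoopA]
    split
    · rename_i h
      simp only [List.contains_iff_mem] at h
      simp [h]
    · rename_i h
      simp only [List.contains_iff_mem] at h
      simp [ih, h]

theorem ntLoopA_eq_true_iff (ws : List String) :
    ntLoopA ws = true ↔ ∃ w ∈ ws, PySem.Str.isIn "n't" w = true := by
  induction ws with
  | nil => simp [ntLoopA]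
  | cons a rest ih =>
    simp only [ntLoopA]
    by_cases h : PySem.Str.isIn "n't" a = true
    · rw [if_pos h]
      exact iff_of_true rfl ⟨a, List.mem_cons_self, h⟩
    · rw [if_neg h, ih]
      constructor
      · rintro ⟨w, hw, hs⟩; exact ⟨w, List.mem_cons_of_mem _ hw, hs⟩
      · rintro ⟨w, hw, hs⟩
        rcases List.mem_cons.mp hw with rfl | hw'
        · exact absurd hs h
        · exact ⟨w, hw', hs⟩

-- the space-separated literal splits (after dedup) to exactly the NEGATE list
set_option maxRecDepth 4000 in
theorem negSetB_words : negSetB = NEGATE := by decide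

theorem negSetB_contains_iff (s : String) : negSetB.contains s = true ↔ s ∈ NEGATE := by
  rw [PySem.Set.contains_iff, negSetB_words]

theorem negated_alt_eq_true_iff (ws : List String) (inc : Bool) :
    negated_alt ws inc = true ↔
      ∃ x ∈ ws, PySem.Str.lower x ∈ NEGATE ∨
        (inc = true ∧ PySem.Str.isIn "n't" (PySem.Str.lower x) = true) := by
  induction ws with
  | nil => simp [negated_alt]
  | cons a rest ih =>
    simp only [negated_alt]
    by_cases h : (negSetB.contains (PySem.Str.lower a)
        || (inc && PySem.Str.isIn "n't" (PySem.Str.lower a))) = true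
    · rw [if_pos h]
      refine iff_of_true rfl ⟨a, List.mem_cons_self, ?_⟩
      rcases Bool.or_eq_true_iff.mp h with h1 | h2
      · exact Or.inl ((negSetB_contains_iff _).mp h1)
      · exact Or.inr (Bool.and_eq_true_iff.mp h2)
    · rw [if_neg h, ih]
      constructor
      · rintro ⟨w, hw, hs⟩; exact ⟨w, List.mem_cons_of_mem _ hw, hs⟩
      · rintro ⟨w, hw, hs⟩
        rcases List.mem_cons.mp hw with rfl | hw'
        · exfalso; apply h
          rcases hs with h1 | ⟨h2, h3⟩
          · exact Bool.or_eq_true_iff.mpr (Or.inl ((negSetB_contains_iff _).mpr h1))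
          · exact Bool.or_eq_true_iff.mpr (Or.inr (Bool.and_eq_true_iff.mpr ⟨h2, h3⟩))
        · exact ⟨w, hw', hs⟩

-- ===== VERDICT (by name: the statement is the Claim_ definition above) =====
theorem negated_spec : Claim_equal_negated := by
  intro input_words include_nt _
  unfold Spec_negated negated
  simp only [List.nil_append]
  rw [Bool.eq_iff_iff, negated_alt_eq_true_iff]
  constructor
  · intro h
    split at h
    · rename_i hneg
      rw [negLoopA_eq_true_iff] at hneg
      obtain ⟨w, hwNeg, hwIn⟩ := hneg
      obtain ⟨x, hx, rfl⟩ := List.mem_map.mp hwIn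
      exact ⟨x, hx, Or.inl hwNeg⟩
    · split at h
      · rename_i hnt
        rw [ntLoopA_eq_true_iff] at h
        obtain ⟨w, hwIn, hw⟩ := h
        obtain ⟨x, hx, rfl⟩ := List.mem_map.mp hwIn
        exact ⟨x, hx, Or.inr ⟨hnt, hw⟩⟩
      · exact absurd h (by simp)
  · rintro ⟨x, hx, hcase⟩
    rcases hcase with hneg | ⟨hnt, hsub⟩
    · have : negLoopA NEGATE (input_words.map PySem.Str.lower) = true := by
        rw [negLoopA_eq_true_iff]
        exact ⟨PySem.Str.lower x, hneg, List.mem_map_of_mem hx⟩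
      simp [this]
    · subst hnt
      have h1 : ntLoopA (input_words.map PySem.Str.lower) = true := by
        rw [ntLoopA_eq_true_iff]
        exact ⟨PySem.Str.lower x, List.mem_map_of_mem hx, hsub⟩
      split
      · rfl
      · simpa using h1
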